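-- pv_equiv track=rewrite | github.com/python-discord/game-jam-2020 | charlie-experiments/grid_functions.py | compress_left
-- ===== SOURCE A (Python) =====
-- from typing import List
--
-- def compress_left(grid: List) -> bool:
--     changed = False
--     for row_no in range(len(grid)):
--         cur_col = 0
--         for _ in range(len(grid)):
--             if grid[row_no][cur_col] != 0:
--                 # No zero, look further left
--                 cur_col += 1
--             else:
--                 # Found a zero, shift cells to the right
--                 c = cur_col
--                 while c < len(grid) - 1:
--                     grid[row_no][c] = grid[row_no][c + 1]
--                     if grid[row_no][c]:
--                         changed = True
--                     c += 1
--                 grid[row_no][-1] = 0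
--     return changed
-- ===== SOURCE B (Python) =====
-- from typing import List
--
-- def compress_left(grid: List) -> bool:
--     # One left-to-right scan per row over the n x n grid: the compaction
--     # changes a row exactly when a nonzero cell appears after a zero cell.
--     # Then compact the row's first n cells in one pass.
--     n = len(grid)
--     changed = False
--     for row in grid:
--         seen_zero = False
--         for j in range(n):
--             v = row[j]
--             if v == 0:
--                 seen_zero = True
--             elif seen_zero:
--                 changed = True
--         nonzeros = [v for v in row[:n] if v != 0]
--         row[:n] = nonzeros + [0] * (n - len(nonzeros))
--     return changed
-- ===== Notes on version B (the rewrite author's own statement) =====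
-- stated objective: alternative
-- what changed: Replaces A's n passes of shift-on-zero per row (each shift itself an inner scan that mutates the row) with a single left-to-right scan per row that sets changed when a nonzero cell follows a zero, plus one filter pass to compact the row.
import Mathlib
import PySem

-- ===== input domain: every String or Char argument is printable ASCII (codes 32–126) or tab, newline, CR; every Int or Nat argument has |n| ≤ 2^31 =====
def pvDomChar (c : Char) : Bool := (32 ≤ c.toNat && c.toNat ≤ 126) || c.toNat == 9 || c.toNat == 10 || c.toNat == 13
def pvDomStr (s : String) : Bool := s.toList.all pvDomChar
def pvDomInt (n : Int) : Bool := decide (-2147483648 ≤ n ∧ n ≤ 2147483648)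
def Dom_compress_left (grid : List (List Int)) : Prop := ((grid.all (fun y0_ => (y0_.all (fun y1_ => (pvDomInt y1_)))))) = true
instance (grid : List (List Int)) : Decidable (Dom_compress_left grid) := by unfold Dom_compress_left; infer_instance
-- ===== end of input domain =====

-- B replaces A's repeated shift-on-zero passes by one scan per row; A mutates
-- `grid` in place and B compacts each row's first len(grid) cells in place —
-- the equivalence proved here is about the RETURN value only.

-- ===== PORT A =====
-- the inner `while c < len(grid) - 1` shift loop (Nat `n - 1` matches Python:
-- for n = 0 the Python bound -1 also admits no iteration)
def pvShift (row : List Int) (c n : Nat) (ch : Bool) : List Int × Bool :=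
  if _h : c < n - 1 then
    -- grid[row_no][c] = grid[row_no][c+1]; then `if grid[row_no][c]:` reads the value just copied
    pvShift (row.set c (row.getD (c + 1) 0)) (c + 1) n (ch || (row.getD (c + 1) 0 != 0))
  else (row, ch)
termination_by n - 1 - c

-- the inner `for _ in range(len(grid))` loop over one row, state (row, cur_col, changed)
def pvInner (row : List Int) (c n k : Nat) (ch : Bool) : List Int × Bool :=
  match k with
  | 0 => (row, ch)
  | k + 1 =>
    if row.getD c 0 ≠ 0 then            -- grid[row_no][cur_col] != 0; in-range under Pre_
      pvInner row (c + 1) n k ch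
    else
      pvInner ((pvShift row c n ch).1.set ((pvShift row c n ch).1.length - 1) 0) c n k
        (pvShift row c n ch).2   -- grid[row_no][-1] = 0

def compress_left (grid : List (List Int)) : Bool :=
  grid.foldl (fun ch row => (pvInner row 0 grid.length grid.length ch).2) false

-- ===== PORT B =====
-- one step of B's scan, state (seen_zero, changed)
def bStep (p : Bool × Bool) (v : Int) : Bool × Bool :=
  if v == 0 then (true, p.2) else (p.1, p.2 || p.1)

-- B's per-row scan `for j in range(n): v = row[j]; ...` with state
-- (seen_zero, changed); v = row[j] is in range under Pre_.  B's in-place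
-- compaction of the row does not affect the returned Bool and is not modelled.
def compress_left_alt (grid : List (List Int)) : Bool :=
  grid.foldl
    (fun ch row =>
      ((List.range grid.length).foldl (fun p j => bStep p (row.getD j 0)) (false, ch)).2)
    false

-- ===== PRECONDITION & SPEC =====
-- A indexes every row at columns 0..len(grid)-1 and raises IndexError when a
-- row is shorter than the grid; exactly those inputs are excluded.
def Pre_compress_left (grid : List (List Int)) : Prop :=
  ∀ row ∈ grid, grid.length ≤ row.length

instance (grid : List (List Int)) : Decidable (Pre_compress_left grid) := by
  unfold Pre_compress_left; infer_instance

def pvWitness_compress_left : List (List Int) := [[1, 0], [0, 2]]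

def Spec_compress_left (grid : List (List Int)) (out : Bool) : Prop := out = compress_left_alt grid
instance (grid : List (List Int)) (out : Bool) : Decidable (Spec_compress_left grid out) := by
  unfold Spec_compress_left; infer_instance

-- ===== CLAIM (what is proved, stated in full; the proofs are below) =====
def Claim_equal_compress_left : Prop := ∀ (grid : List (List Int)), Dom_compress_left grid → Pre_compress_left grid → Spec_compress_left grid (compress_left grid)


-- ===== LEMMAS AND PROOFS =====

-- "row has, between columns c and n, a nonzero cell strictly after a zero cell"
def CP (row : List Int) (c n : Nat) : Prop :=
  ∃ i j, c ≤ i ∧ i < j ∧ j < n ∧ row.getD i 0 = 0 ∧ row.getD j 0 ≠ 0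

theorem getD_set_ne (l : List Int) (m j : Nat) (a : Int) (h : m ≠ j) :
    (l.set m a).getD j 0 = l.getD j 0 := by
  simp [List.getD, h]


theorem getD_set_zero (l : List Int) (m j : Nat) (h : l.getD j 0 = 0) :
    (l.set m 0).getD j 0 = 0 := by
  by_cases hm : m = j
  · subst hm
    simp [List.getD, List.getElem?_set]
    split <;> simp
  · rwa [getD_set_ne _ _ _ _ hm]

theorem pvShift_zero (row : List Int) (c n : Nat) (ch : Bool) (m : Nat) (hm : m ≤ c)
    (hz : ∀ j, m ≤ j → j < n → row.getD j 0 = 0) :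
    (pvShift row c n ch).2 = ch ∧
      (∀ j, m ≤ j → j < n → (pvShift row c n ch).1.getD j 0 = 0) := by
  induction row, c, ch using pvShift.induct (n := n) with
  | case1 row c ch h ih =>
    have hv : row.getD (c + 1) 0 = 0 := hz (c + 1) (by omega) (by omega)
    have hz' : ∀ j, m ≤ j → j < n → (row.set c (row.getD (c + 1) 0)).getD j 0 = 0 := by
      intro j hj1 hj2
      rw [hv]
      exact getD_set_zero _ _ _ (hz j hj1 hj2)
    have hres := ih (by omega) hz'
    rw [pvShift, dif_pos h]
    refine ⟨?_, hres.2⟩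
    rw [hres.1, hv]
    simp
  | case2 row c ch h =>
    rw [pvShift, dif_neg h]
    exact ⟨rfl, hz⟩

theorem pvShift_mono (row : List Int) (c n : Nat) (ch : Bool) (hch : ch = true) :
    (pvShift row c n ch).2 = true := by
  induction row, c, ch using pvShift.induct (n := n) with
  | case1 row c ch h ih =>
    rw [pvShift, dif_pos h]
    exact ih (by simp [hch])
  | case2 row c ch h =>
    rw [pvShift, dif_neg h]; exact hch

theorem pvShift_nz (row : List Int) (c n : Nat) (ch : Bool) (j : Nat)
    (hcj : c < j) (hjn : j < n) (hnz : row.getD j 0 ≠ 0) :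
    (pvShift row c n ch).2 = true := by
  induction row, c, ch using pvShift.induct (n := n) with
  | case1 row c ch h ih =>
    rw [pvShift, dif_pos h]
    by_cases hj : j = c + 1
    · subst hj
      refine pvShift_mono _ _ _ _ ?_
      simp only [Bool.or_eq_true, bne_iff_ne, ne_eq]
      exact Or.inr hnz
    · exact ih (by omega) (by rwa [getD_set_ne _ _ _ _ (by omega)])
  | case2 row c ch h =>
    exfalso; omega

theorem pvInner_mono (k : Nat) (row : List Int) (c n : Nat) :
    (pvInner row c n k true).2 = true := by
  induction k generalizing row c with
  | zero => rfl
  | succ k ih =>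
    rw [pvInner]
    split
    · exact ih _ _
    · rw [pvShift_mono row c n true rfl]
      exact ih _ _

theorem pvInner_NC (k : Nat) (row : List Int) (c n : Nat) (ch : Bool)
    (h : ¬ CP row c n) : (pvInner row c n k ch).2 = ch := by
  induction k generalizing row c with
  | zero => rfl
  | succ k ih =>
    rw [pvInner]
    split
    · rename_i h0
      refine ih row (c + 1) ?_
      rintro ⟨i, j, hci, hij, hjn, hi0, hj0⟩
      exact h ⟨i, j, by omega, hij, hjn, hi0, hj0⟩
    · rename_i h0
      simp only [ne_eq, not_not] at h0
      -- row is zero on [c, n): row[c] = 0 and a later nonzero would witness CP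
      have hz : ∀ j, c ≤ j → j < n → row.getD j 0 = 0 := by
        intro j hj1 hj2
        rcases Nat.eq_or_lt_of_le hj1 with rfl | hlt
        · exact h0
        · by_contra hne
          exact h ⟨c, j, le_refl c, hlt, hj2, h0, hne⟩
      obtain ⟨hch, hz'⟩ := pvShift_zero row c n ch c (le_refl c) hz
      rw [hch]
      refine ih _ c ?_
      rintro ⟨i, j, hci, hij, hjn, hi0, hj0⟩
      exact hj0 (getD_set_zero _ _ _ (hz' j (by omega) hjn))

theorem pvInner_CH (k : Nat) (row : List Int) (c n : Nat) (ch : Bool)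
    (h : CP row c n) (hk : n ≤ c + k) : (pvInner row c n k ch).2 = true := by
  induction k generalizing row c ch with
  | zero =>
    obtain ⟨i, j, hci, hij, hjn, _, _⟩ := h
    omega
  | succ k ih =>
    obtain ⟨i, j, hci, hij, hjn, hi0, hj0⟩ := h
    rw [pvInner]
    split
    · rename_i h0
      refine ih row (c + 1) ch ⟨i, j, ?_, hij, hjn, hi0, hj0⟩ (by omega)
      rcases Nat.eq_or_lt_of_le hci with rfl | _
      · exact absurd hi0 h0
      · omega
    · rw [pvShift_nz row c n ch j (by omega) hjn hj0]
      exact pvInner_mono _ _ _ _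

theorem bStep_zero (p : Bool × Bool) : bStep p 0 = (true, p.2) := by
  simp [bStep]

theorem bStep_nz (sz ch : Bool) (v : Int) (hv : v ≠ 0) :
    bStep (sz, ch) v = (sz, ch || sz) := by
  simp [bStep, hv]

theorem bFold_mono (l : List Int) (sz : Bool) :
    (l.foldl bStep (sz, true)).2 = true := by
  induction l generalizing sz with
  | nil => rfl
  | cons v t ih =>
    rw [List.foldl_cons]
    by_cases hv : v = 0
    · rw [hv, bStep_zero]; exact ih true
    · rw [bStep_nz _ _ _ hv, Bool.true_or]; exact ih sz

theorem bFold_zero (l : List Int) (sz : Bool) (ch : Bool)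
    (hz : ∀ j, j < l.length → l.getD j 0 = 0) :
    (l.foldl bStep (sz, ch)).2 = ch := by
  induction l generalizing sz with
  | nil => rfl
  | cons v t ih =>
    have hv : v = 0 := hz 0 (by simp)
    rw [List.foldl_cons, hv, bStep_zero]
    exact ih true (fun j hj => by simpa using hz (j + 1) (by simpa using hj))

theorem bFold_nz (l : List Int) (ch : Bool)
    (h : ∃ j, j < l.length ∧ l.getD j 0 ≠ 0) :
    (l.foldl bStep (true, ch)).2 = true := by
  induction l generalizing ch with
  | nil => obtain ⟨j, hj, _⟩ := h; simp at hj
  | cons v t ih =>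
    rw [List.foldl_cons]
    by_cases hv : v = 0
    · rw [hv, bStep_zero]
      obtain ⟨j, hj, hnz⟩ := h
      match j with
      | 0 => exact absurd hv (by simpa using hnz)
      | j + 1 =>
        exact ih ch ⟨j, by simpa using hj, by simpa using hnz⟩
    · rw [bStep_nz _ _ _ hv, Bool.or_true]
      exact bFold_mono t _

theorem bFold_NC (l : List Int) (ch : Bool) (h : ¬ CP l 0 l.length) :
    (l.foldl bStep (false, ch)).2 = ch := by
  induction l generalizing ch with
  | nil => rfl
  | cons v t ih =>
    rw [List.foldl_cons]
    by_cases hv : v = 0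
    · rw [hv, bStep_zero]
      refine bFold_zero t true ch ?_
      intro j hj
      by_contra hne
      exact h ⟨0, j + 1, le_refl 0, by omega, by simpa using hj, by simp [hv], by simpa using hne⟩
    · rw [bStep_nz _ _ _ hv, Bool.or_false]
      refine ih ch ?_
      rintro ⟨i, j, _, hij, hjn, hi0, hj0⟩
      exact h ⟨i + 1, j + 1, by omega, by omega, by simpa using hjn, by simpa using hi0, by simpa using hj0⟩

theorem bFold_CH (l : List Int) (sz ch : Bool) (h : CP l 0 l.length) :
    (l.foldl bStep (sz, ch)).2 = true := by
  induction l generalizing sz ch with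
  | nil => obtain ⟨i, j, _, _, hjn, _, _⟩ := h; simp at hjn
  | cons v t ih =>
    obtain ⟨i, j, _, hij, hjn, hi0, hj0⟩ := h
    rw [List.foldl_cons]
    match i with
    | 0 =>
      have hv : v = 0 := by simpa using hi0
      rw [hv, bStep_zero]
      match j with
      | j + 1 =>
        exact bFold_nz t ch ⟨j, by simpa using hjn, by simpa using hj0⟩
    | i + 1 =>
      match j with
      | j + 1 =>
        have hcp : CP t 0 t.length :=
          ⟨i, j, by omega, by omega, by simpa using hjn, by simpa using hi0, by simpa using hj0⟩
        by_cases hv : v = 0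
        · rw [hv, bStep_zero]; exact ih true ch hcp
        · rw [bStep_nz _ _ _ hv]; exact ih sz (ch || sz) hcp

theorem getD_take (l : List Int) (n j : Nat) (hj : j < n) :
    (l.take n).getD j 0 = l.getD j 0 := by
  simp [List.getD, hj]

theorem map_range_getD (l : List Int) (n : Nat) (hn : n ≤ l.length) :
    (List.range n).map (fun j => l.getD j 0) = l.take n := by
  apply List.ext_getElem
  · simpa using hn
  · intro i h1 h2
    have hi : i < l.length := by simp at h1; omega
    simp [List.getD, List.getElem?_eq_getElem hi]

theorem row_eq (row : List Int) (n : Nat) (hn : n ≤ row.length) (ch : Bool) :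
    (pvInner row 0 n n ch).2
      = ((List.range n).foldl (fun p j => bStep p (row.getD j 0)) (false, ch)).2 := by
  have hfold : (List.range n).foldl (fun p j => bStep p (row.getD j 0)) (false, ch)
      = (row.take n).foldl bStep (false, ch) := by
    rw [← map_range_getD row n hn, List.foldl_map]
  rw [hfold]
  have hlen : (row.take n).length = n := by simp [hn]
  by_cases h : CP row 0 n
  · rw [pvInner_CH n row 0 n ch h (by omega)]
    obtain ⟨i, j, hci, hij, hjn, hi0, hj0⟩ := h
    exact (bFold_CH _ _ _ ⟨i, j, hci, hij, by omega,
      by rwa [getD_take _ _ _ (by omega)], by rwa [getD_take _ _ _ (by omega)]⟩).symm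
  · rw [pvInner_NC n row 0 n ch h]
    refine (bFold_NC _ _ ?_).symm
    rintro ⟨i, j, hci, hij, hjn, hi0, hj0⟩
    rw [hlen] at hjn
    rw [getD_take _ _ _ (by omega)] at hi0
    rw [getD_take _ _ _ (by omega)] at hj0
    exact h ⟨i, j, hci, hij, hjn, hi0, hj0⟩

theorem fold_eq (rows : List (List Int)) (n : Nat)
    (h : ∀ row ∈ rows, n ≤ row.length) (ch : Bool) :
    rows.foldl (fun ch row => (pvInner row 0 n n ch).2) ch
      = rows.foldl
          (fun ch row => ((List.range n).foldl (fun p j => bStep p (row.getD j 0)) (false, ch)).2) ch := by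
  induction rows generalizing ch with
  | nil => rfl
  | cons r t ih =>
    rw [List.foldl_cons, List.foldl_cons,
      row_eq r n (h r (by simp)) ch]
    exact ih (fun row hm => h row (by simp [hm])) _

-- ===== VERDICT =====
theorem compress_left_spec : Claim_equal_compress_left := by
  intro grid _ hpre
  unfold Spec_compress_left compress_left compress_left_alt
  exact fold_eq grid grid.length hpre false
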